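-- pv_equiv track=rewrite | github.com/buaa-colalab/AEOSBench | tools/generate_tabu_lists.py | get_tabu_list
-- ===== SOURCE A (Python) =====
-- def get_tabu_list(failed: set[int], actions: list[int]) -> list[int]:
--     tabu: list[int] = []
--
--     if len(actions) == 0:
--         return tabu
--
--     if actions[0] in failed:
--         tabu.append(actions[0])
--
--     i = 0
--     j = 1
--     while True:
--         while j < len(actions) and actions[j] == actions[i]:
--             j += 1
--
--         if j >= len(actions):
--             break
--
--         if actions[i] not in failed and actions[j] in failed:
--             tabu.append(actions[j])
--         i = j
--         j = i + 1
--
--     return sorted(set(tabu))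
-- ===== SOURCE B (Python) =====
-- def get_tabu_list(failed: set[int], actions: list[int]) -> list[int]:
--     # run-compress first, then one pairwise scan over adjacent groups
--     groups: list[int] = []
--     for a in actions:
--         if not groups or groups[-1] != a:
--             groups.append(a)
--
--     tabu: set[int] = set()
--     if groups and groups[0] in failed:
--         tabu.add(groups[0])
--     for prev, cur in zip(groups, groups[1:]):
--         if prev not in failed and cur in failed:
--             tabu.add(cur)
--     return sorted(tabu)
-- ===== Notes on version B (the rewrite author's own statement) =====
-- stated objective: alternative
-- what changed: A's interleaved two-pointer index loop (inner equal-skip while + outer emit) is replaced by a build-then-scan decomposition: first run-compress the actions into groups, then a separate pairwise pass over adjacent groups collects failed groups that follow non-failed ones.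
import Mathlib
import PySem

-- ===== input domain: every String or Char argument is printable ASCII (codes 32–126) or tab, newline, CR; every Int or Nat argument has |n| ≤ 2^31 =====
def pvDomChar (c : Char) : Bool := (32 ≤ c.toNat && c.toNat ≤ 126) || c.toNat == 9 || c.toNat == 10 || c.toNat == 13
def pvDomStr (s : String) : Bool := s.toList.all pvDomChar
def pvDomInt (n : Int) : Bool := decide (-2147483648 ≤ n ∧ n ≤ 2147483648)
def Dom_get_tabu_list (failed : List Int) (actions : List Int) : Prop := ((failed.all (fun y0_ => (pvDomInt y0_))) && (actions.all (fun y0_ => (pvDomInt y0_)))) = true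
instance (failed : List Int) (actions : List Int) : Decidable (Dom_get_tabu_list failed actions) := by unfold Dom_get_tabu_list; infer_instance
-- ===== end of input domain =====

-- B replaces A's interleaved two-pointer loop by run-compression followed by a pairwise scan (objective: alternative decomposition, same cost).

-- ===== PORT A =====
-- inner `while j < len(actions) and actions[j] == actions[i]: j += 1`
def pvSkipA (actions : List Int) (i : Nat) (j : Nat) : Nat :=
  if h : j < actions.length ∧ actions.getD j 0 = actions.getD i 0 then
    pvSkipA actions i (j + 1)
  else j
termination_by actions.length - j
decreasing_by omega

theorem pvSkipA_ge (actions : List Int) (i j : Nat) : j ≤ pvSkipA actions i j := by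
  fun_induction pvSkipA with
  | case1 j h ih => omega
  | case2 j h => omega

-- outer `while True: …` loop of A, state (i, j, tabu)
def pvLoopA (failed : List Int) (actions : List Int) (i j : Nat) (tabu : List Int) : List Int :=
  let j' := pvSkipA actions i j
  if h : j' < actions.length then
    let tabu' := if !(failed.contains (actions.getD i 0)) && failed.contains (actions.getD j' 0)
                 then tabu ++ [actions.getD j' 0] else tabu
    pvLoopA failed actions j' (j' + 1) tabu'
  else tabu
termination_by actions.length - j
decreasing_by
  have := pvSkipA_ge actions i j
  omega

def get_tabu_list (failed : List Int) (actions : List Int) : List Int :=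
  if actions.length = 0 then []
  else
    let tabu := if failed.contains (actions.getD 0 0) then [actions.getD 0 0] else []
    PySem.List.sorted (PySem.Set.ofList (pvLoopA failed actions 0 1 tabu)) (fun x => x) false

-- ===== PORT B =====
-- `for a in actions: if not groups or groups[-1] != a: groups.append(a)`
def pvGroupsB (actions : List Int) : List Int :=
  actions.foldl (fun gs a => if gs = [] ∨ gs.getLast? ≠ some a then gs ++ [a] else gs) []

def get_tabu_list_alt (failed : List Int) (actions : List Int) : List Int :=
  let groups := pvGroupsB actions
  let tabu0 : PySem.Set Int := PySem.Set.empty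
  let tabu1 := match groups with
    | [] => tabu0
    | g :: _ => if failed.contains g then PySem.Set.add tabu0 g else tabu0
  let tabu2 := (groups.zip groups.tail).foldl
    (fun t (p : Int × Int) =>
      if !(failed.contains p.1) && failed.contains p.2 then PySem.Set.add t p.2 else t) tabu1
  PySem.List.sorted tabu2 (fun x => x) false

-- ===== PRECONDITION & SPEC =====
def Spec_get_tabu_list (failed : List Int) (actions : List Int) (out : List Int) : Prop := out = get_tabu_list_alt failed actions
instance (failed : List Int) (actions : List Int) (out : List Int) : Decidable (Spec_get_tabu_list failed actions out) := by unfold Spec_get_tabu_list; infer_instance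

-- ===== CLAIM (what is proved, stated in full; the proofs are below) =====
def Claim_equal_get_tabu_list : Prop := ∀ (failed : List Int) (actions : List Int), Dom_get_tabu_list failed actions → Spec_get_tabu_list failed actions (get_tabu_list failed actions)

-- ===== LEMMAS AND PROOFS =====

-- run-compression of l knowing the previous value v
def pvGroupsP (v : Int) : List Int → List Int
  | [] => []
  | a :: rest => if a = v then pvGroupsP v rest else a :: pvGroupsP a rest

-- emitted failed-after-non-failed values, structural recursion over the raw list
def pvCoreL (failed : List Int) (v : Int) : List Int → List Int
  | [] => []
  | a :: rest =>
      if a = v then pvCoreL failed v rest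
      else (if !(failed.contains v) && failed.contains a then [a] else []) ++ pvCoreL failed a rest

-- same, over an already-compressed group list
def pvCoreG (failed : List Int) (v : Int) : List Int → List Int
  | [] => []
  | a :: gs => (if !(failed.contains v) && failed.contains a then [a] else []) ++ pvCoreG failed a gs

theorem pvCoreL_eq_coreG (failed : List Int) (v : Int) (l : List Int) :
    pvCoreL failed v l = pvCoreG failed v (pvGroupsP v l) := by
  induction l generalizing v with
  | nil => rfl
  | cons a rest ih =>
      simp only [pvCoreL, pvGroupsP]
      by_cases h : a = v
      · simp [h, ih]
      · simp [h, pvCoreG, ih]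

theorem pvSkipA_coreL (failed : List Int) (actions : List Int) (i j : Nat) :
    pvCoreL failed (actions.getD i 0) (actions.drop j)
      = pvCoreL failed (actions.getD i 0) (actions.drop (pvSkipA actions i j)) := by
  fun_induction pvSkipA with
  | case1 j h ih =>
      rw [← ih]
      have hd : actions.drop j = actions.getD j 0 :: actions.drop (j + 1) := by
        rw [List.getD_eq_getElem?_getD, List.getElem?_eq_getElem h.1]
        exact List.drop_eq_getElem_cons h.1
      rw [hd]
      simp only [pvCoreL]
      rw [if_pos h.2]
  | case2 j h => rfl

theorem pvSkipA_ne (actions : List Int) (i j : Nat) (h : pvSkipA actions i j < actions.length) :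
    actions.getD (pvSkipA actions i j) 0 ≠ actions.getD i 0 := by
  fun_induction pvSkipA with
  | case1 j hc ih => exact ih h
  | case2 j hc =>
      intro he
      exact hc ⟨h, he⟩

theorem pvLoopA_eq (failed : List Int) (actions : List Int) (i j : Nat) (tabu : List Int)
    (hj : j ≤ actions.length) :
    pvLoopA failed actions i j tabu = tabu ++ pvCoreL failed (actions.getD i 0) (actions.drop j) := by
  fun_induction pvLoopA with
  | case1 i j tabu j' h tabu' ih =>
      rw [ih h, pvSkipA_coreL failed actions i j]
      have hd : actions.drop j' = actions.getD j' 0 :: actions.drop (j' + 1) := by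
        rw [List.getD_eq_getElem?_getD, List.getElem?_eq_getElem h]
        exact List.drop_eq_getElem_cons h
      have hne : actions.getD j' 0 ≠ actions.getD i 0 := pvSkipA_ne actions i j h
      rw [hd]
      simp only [pvCoreL, if_neg hne, tabu']
      split <;> simp
  | case2 i j tabu j' h =>
      have h1 : actions.length ≤ j' := by omega
      rw [pvSkipA_coreL failed actions i j, List.drop_eq_nil_of_le h1]
      simp [pvCoreL]
  
theorem pvGroupsB_foldl (actions : List Int) (gs : List Int) (x : Int)
    (hx : gs.getLast? = some x) :
    actions.foldl (fun gs a => if gs = [] ∨ gs.getLast? ≠ some a then gs ++ [a] else gs) gs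
      = gs ++ pvGroupsP x actions := by
  induction actions generalizing gs x with
  | nil => simp [pvGroupsP]
  | cons a rest ih =>
      have hne : gs ≠ [] := by intro h; simp [h] at hx
      simp only [List.foldl_cons, pvGroupsP]
      by_cases h : a = x
      · have : ¬ (gs = [] ∨ gs.getLast? ≠ some a) := by
          push Not; exact ⟨hne, by rw [hx, h]⟩
        rw [if_neg this, if_pos h, ih gs x hx]
      · have : gs = [] ∨ gs.getLast? ≠ some a := by
          right; rw [hx]; intro he; exact h (Option.some.inj he).symm
        rw [if_pos this, if_neg h, ih (gs ++ [a]) a (by simp)]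
        simp
  
theorem pvGroupsB_cons (a : Int) (rest : List Int) :
    pvGroupsB (a :: rest) = a :: pvGroupsP a rest := by
  have h0 : pvGroupsB (a :: rest)
      = List.foldl (fun gs b => if gs = [] ∨ gs.getLast? ≠ some b then gs ++ [b] else gs) [a] rest := by
    simp [pvGroupsB]
  rw [h0, pvGroupsB_foldl rest [a] a (by simp)]
  rfl

theorem pvZipFold (failed : List Int) (gs : List Int) (v : Int) (t : PySem.Set Int) :
    ((v :: gs).zip gs).foldl
      (fun t (p : Int × Int) =>
        if !(failed.contains p.1) && failed.contains p.2 then PySem.Set.add t p.2 else t) t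
      = (pvCoreG failed v gs).foldl (fun s x => PySem.Set.add s x) t := by
  induction gs generalizing v t with
  | nil => rfl
  | cons a gs' ih =>
      simp only [List.zip_cons_cons, List.foldl_cons, pvCoreG]
      by_cases h : (!(failed.contains v) && failed.contains a) = true
      · simp only [if_pos h, List.foldl_append, List.foldl_cons, List.foldl_nil]
        exact ih a _
      · simp only [if_neg h]
        exact ih a _

theorem get_tabu_list_eq_alt (failed : List Int) (actions : List Int) :
    get_tabu_list failed actions = get_tabu_list_alt failed actions := by
  cases actions with
  | nil => rfl
  | cons a rest =>
      unfold get_tabu_list get_tabu_list_alt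
      rw [pvGroupsB_cons]
      simp only [List.length_cons, Nat.succ_ne_zero, if_false, List.getD_cons_zero, List.tail_cons]
      rw [pvZipFold, pvLoopA_eq failed (a :: rest) 0 1 _ (by simp)]
      rw [show (a :: rest).getD 0 0 = a from rfl, show (a :: rest).drop 1 = rest from rfl]
      rw [pvCoreL_eq_coreG]
      congr 1
      -- both sets are built by the same sequence of adds
      have hof : ∀ (l1 l2 : List Int), PySem.Set.ofList (l1 ++ l2)
          = l2.foldl (fun s x => PySem.Set.add s x) (PySem.Set.ofList l1) := by
        intro l1 l2
        rw [PySem.Set.ofList_eq_foldl, PySem.Set.ofList_eq_foldl, List.foldl_append]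
      by_cases h : failed.contains a = true
      · rw [if_pos h, if_pos h, hof]
        rfl
      · rw [if_neg h, if_neg h, hof]
        rfl

-- ===== VERDICT (by name: the statement is the Claim_ definition above) =====
theorem get_tabu_list_spec : Claim_equal_get_tabu_list := by
  intro failed actions _
  unfold Spec_get_tabu_list
  exact get_tabu_list_eq_alt failed actions
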